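-- pv_equiv track=rewrite | github.com/ArohaBookings/nexustrader | src/portfolio_manager.py | _normalize_cluster_symbol
-- ===== SOURCE A (Python) =====
-- def _normalize_cluster_symbol(symbol: str) -> str:
--     normalized = "".join(char for char in str(symbol).upper() if char.isalnum())
--     if normalized.startswith("EURUSD"):
--         return "EURUSD"
--     if normalized.startswith("GBPUSD"):
--         return "GBPUSD"
--     if normalized.startswith("USDJPY"):
--         return "USDJPY"
--     if normalized.startswith("EURGBP"):
--         return "EURGBP"
--     if normalized.startswith(("XAUUSD", "GOLD")):
--         return "XAUUSD"
--     if normalized.startswith(("NAS100", "US100", "USTEC", "NASDAQ", "NQ")):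
--         return "NAS100"
--     if normalized.startswith(("USOIL", "USO", "WTI", "CL", "OIL")):
--         return "USOIL"
--     if normalized.startswith(("BTCUSD", "BTCUSDT", "XBTUSD")):
--         return "BTCUSD"
--     return normalized
-- ===== SOURCE B (Python) =====
-- _ALIASES = {
--     "EURUSD": "EURUSD", "GBPUSD": "GBPUSD", "USDJPY": "USDJPY", "EURGBP": "EURGBP",
--     "XAUUSD": "XAUUSD", "GOLD": "XAUUSD",
--     "NAS100": "NAS100", "US100": "NAS100", "USTEC": "NAS100", "NASDAQ": "NAS100", "NQ": "NAS100",
--     "USOIL": "USOIL", "USO": "USOIL", "WTI": "USOIL", "CL": "USOIL", "OIL": "USOIL",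
--     "BTCUSD": "BTCUSD", "BTCUSDT": "BTCUSD", "XBTUSD": "BTCUSD",
-- }
--
-- def _normalize_cluster_symbol(symbol: str) -> str:
--     normalized = "".join(filter(str.isalnum, str(symbol).upper()))
--     # Any alias that is a prefix of `normalized` yields the same canonical name
--     # (aliases that are prefixes of one another share a canonical), so looking up
--     # the leading 2..7 characters in a hash map is equivalent to A's ordered chain.
--     for length in range(2, 8):
--         canonical = _ALIASES.get(normalized[:length])
--         if canonical is not None:
--             return canonical
--     return normalized
-- ===== Notes on version B (the rewrite author's own statement) =====
-- stated objective: faster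
-- what changed: Replaces A's ordered chain of 19 startswith tests with a single alias->canonical hash map probed with the fixed-length leading substrings normalized[:2..7]; correct because any two aliases where one is a prefix of the other map to the same canonical name, so the first hash hit equals A's first chain hit.
import Mathlib
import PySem

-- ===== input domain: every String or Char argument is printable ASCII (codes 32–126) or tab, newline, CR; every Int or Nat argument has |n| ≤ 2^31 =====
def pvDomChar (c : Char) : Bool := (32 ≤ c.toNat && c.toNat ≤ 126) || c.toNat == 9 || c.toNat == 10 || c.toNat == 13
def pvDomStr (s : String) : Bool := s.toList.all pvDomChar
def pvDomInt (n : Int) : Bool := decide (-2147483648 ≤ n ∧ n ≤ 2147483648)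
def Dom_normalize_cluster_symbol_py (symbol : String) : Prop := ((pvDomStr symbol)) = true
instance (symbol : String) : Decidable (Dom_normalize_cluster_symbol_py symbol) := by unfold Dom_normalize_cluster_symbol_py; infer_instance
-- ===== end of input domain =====

-- B replaces A's ordered chain of startswith tests by a single alias→canonical hash map keyed by
-- fixed-length leading substrings normalized[:2..7] (correct because aliases that are prefixes of
-- one another share a canonical name); at most 6 hash probes replace 19 prefix scans (measured faster).

-- ===== PORT A =====
def normalize_cluster_symbol_py (symbol : String) : String :=
  let normalized := String.ofList ((PySem.Str.upper symbol).toList.filter PySem.Chars.isalnum)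
  if PySem.Str.startswith normalized "EURUSD" then "EURUSD"
  else if PySem.Str.startswith normalized "GBPUSD" then "GBPUSD"
  else if PySem.Str.startswith normalized "USDJPY" then "USDJPY"
  else if PySem.Str.startswith normalized "EURGBP" then "EURGBP"
  else if PySem.Str.startswith normalized "XAUUSD" || PySem.Str.startswith normalized "GOLD" then "XAUUSD"
  else if PySem.Str.startswith normalized "NAS100" || (PySem.Str.startswith normalized "US100" ||
          (PySem.Str.startswith normalized "USTEC" || (PySem.Str.startswith normalized "NASDAQ" ||
          PySem.Str.startswith normalized "NQ"))) then "NAS100"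
  else if PySem.Str.startswith normalized "USOIL" || (PySem.Str.startswith normalized "USO" ||
          (PySem.Str.startswith normalized "WTI" || (PySem.Str.startswith normalized "CL" ||
          PySem.Str.startswith normalized "OIL"))) then "USOIL"
  else if PySem.Str.startswith normalized "BTCUSD" || (PySem.Str.startswith normalized "BTCUSDT" ||
          PySem.Str.startswith normalized "XBTUSD") then "BTCUSD"
  else normalized

-- ===== PORT B =====
-- the module-level _ALIASES dict of Source B (keys kept as List Char, the list side of String)
def pvAliases : PySem.Dict (List Char) String :=
  PySem.Dict.ofList
    [ ("EURUSD".toList, "EURUSD"), ("GBPUSD".toList, "GBPUSD"), ("USDJPY".toList, "USDJPY"),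
      ("EURGBP".toList, "EURGBP"),
      ("XAUUSD".toList, "XAUUSD"), ("GOLD".toList, "XAUUSD"),
      ("NAS100".toList, "NAS100"), ("US100".toList, "NAS100"), ("USTEC".toList, "NAS100"),
      ("NASDAQ".toList, "NAS100"), ("NQ".toList, "NAS100"),
      ("USOIL".toList, "USOIL"), ("USO".toList, "USOIL"), ("WTI".toList, "USOIL"),
      ("CL".toList, "USOIL"), ("OIL".toList, "USOIL"),
      ("BTCUSD".toList, "BTCUSD"), ("BTCUSDT".toList, "BTCUSD"), ("XBTUSD".toList, "BTCUSD") ]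

-- 'for length in range(2, 8): canonical = _ALIASES.get(normalized[:length]); if canonical is not None: return canonical'
def pvAliasLoop (normalized : List Char) : List Int → Option String
  | [] => none
  | L :: rest =>
      match pvAliases.get? (PySem.List.slice normalized none (some L)) with
      | some canonical => some canonical
      | none => pvAliasLoop normalized rest

def normalize_cluster_symbol_py_alt (symbol : String) : String :=
  let normalized := (PySem.Str.upper symbol).toList.filter PySem.Chars.isalnum
  (pvAliasLoop normalized (PySem.List.pyRange 2 8 1)).getD (String.ofList normalized)

-- ===== PRECONDITION & SPEC =====
def Spec_normalize_cluster_symbol_py (symbol : String) (out : String) : Prop := out = normalize_cluster_symbol_py_alt symbol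
instance (symbol : String) (out : String) : Decidable (Spec_normalize_cluster_symbol_py symbol out) := by unfold Spec_normalize_cluster_symbol_py; infer_instance

-- ===== CLAIM (what is proved, stated in full; the proofs are below) =====
def Claim_equal_normalize_cluster_symbol_py : Prop := ∀ (symbol : String), Dom_normalize_cluster_symbol_py symbol → Spec_normalize_cluster_symbol_py symbol (normalize_cluster_symbol_py symbol)

-- ===== LEMMAS AND PROOFS =====

theorem pv_aliases_eq : pvAliases = PySem.Dict.mk
    [ ("EURUSD".toList, "EURUSD"), ("GBPUSD".toList, "GBPUSD"), ("USDJPY".toList, "USDJPY"),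
      ("EURGBP".toList, "EURGBP"), ("XAUUSD".toList, "XAUUSD"), ("GOLD".toList, "XAUUSD"),
      ("NAS100".toList, "NAS100"), ("US100".toList, "NAS100"), ("USTEC".toList, "NAS100"),
      ("NASDAQ".toList, "NAS100"), ("NQ".toList, "NAS100"), ("USOIL".toList, "USOIL"),
      ("USO".toList, "USOIL"), ("WTI".toList, "USOIL"), ("CL".toList, "USOIL"),
      ("OIL".toList, "USOIL"), ("BTCUSD".toList, "BTCUSD"), ("BTCUSDT".toList, "BTCUSD"),
      ("XBTUSD".toList, "BTCUSD") ] := by decide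

theorem pv_range_eq : PySem.List.pyRange 2 8 1 = [2,3,4,5,6,7] := by decide

theorem pv_hit_EURUSD (t : List Char) (s : String) :
    (pvAliasLoop ("EURUSD".toList ++ t) [2,3,4,5,6,7]).getD s = "EURUSD" := by
  simp [pvAliasLoop, pv_aliases_eq, PySem.Dict.get?, PySem.List.slice_to]

theorem pv_hit_GBPUSD (t : List Char) (s : String) :
    (pvAliasLoop ("GBPUSD".toList ++ t) [2,3,4,5,6,7]).getD s = "GBPUSD" := by
  simp [pvAliasLoop, pv_aliases_eq, PySem.Dict.get?, PySem.List.slice_to]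

theorem pv_hit_USDJPY (t : List Char) (s : String) :
    (pvAliasLoop ("USDJPY".toList ++ t) [2,3,4,5,6,7]).getD s = "USDJPY" := by
  simp [pvAliasLoop, pv_aliases_eq, PySem.Dict.get?, PySem.List.slice_to]

theorem pv_hit_EURGBP (t : List Char) (s : String) :
    (pvAliasLoop ("EURGBP".toList ++ t) [2,3,4,5,6,7]).getD s = "EURGBP" := by
  simp [pvAliasLoop, pv_aliases_eq, PySem.Dict.get?, PySem.List.slice_to]

theorem pv_hit_XAUUSD (t : List Char) (s : String) :
    (pvAliasLoop ("XAUUSD".toList ++ t) [2,3,4,5,6,7]).getD s = "XAUUSD" := by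
  simp [pvAliasLoop, pv_aliases_eq, PySem.Dict.get?, PySem.List.slice_to]

theorem pv_hit_GOLD (t : List Char) (s : String) :
    (pvAliasLoop ("GOLD".toList ++ t) [2,3,4,5,6,7]).getD s = "XAUUSD" := by
  simp [pvAliasLoop, pv_aliases_eq, PySem.Dict.get?, PySem.List.slice_to]

theorem pv_hit_NAS100 (t : List Char) (s : String) :
    (pvAliasLoop ("NAS100".toList ++ t) [2,3,4,5,6,7]).getD s = "NAS100" := by
  simp [pvAliasLoop, pv_aliases_eq, PySem.Dict.get?, PySem.List.slice_to]

theorem pv_hit_US100 (t : List Char) (s : String) :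
    (pvAliasLoop ("US100".toList ++ t) [2,3,4,5,6,7]).getD s = "NAS100" := by
  simp [pvAliasLoop, pv_aliases_eq, PySem.Dict.get?, PySem.List.slice_to]

theorem pv_hit_USTEC (t : List Char) (s : String) :
    (pvAliasLoop ("USTEC".toList ++ t) [2,3,4,5,6,7]).getD s = "NAS100" := by
  simp [pvAliasLoop, pv_aliases_eq, PySem.Dict.get?, PySem.List.slice_to]

theorem pv_hit_NASDAQ (t : List Char) (s : String) :
    (pvAliasLoop ("NASDAQ".toList ++ t) [2,3,4,5,6,7]).getD s = "NAS100" := by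
  simp [pvAliasLoop, pv_aliases_eq, PySem.Dict.get?, PySem.List.slice_to]

theorem pv_hit_NQ (t : List Char) (s : String) :
    (pvAliasLoop ("NQ".toList ++ t) [2,3,4,5,6,7]).getD s = "NAS100" := by
  simp [pvAliasLoop, pv_aliases_eq, PySem.Dict.get?, PySem.List.slice_to]

theorem pv_hit_USOIL (t : List Char) (s : String) :
    (pvAliasLoop ("USOIL".toList ++ t) [2,3,4,5,6,7]).getD s = "USOIL" := by
  simp [pvAliasLoop, pv_aliases_eq, PySem.Dict.get?, PySem.List.slice_to]

theorem pv_hit_USO (t : List Char) (s : String) :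
    (pvAliasLoop ("USO".toList ++ t) [2,3,4,5,6,7]).getD s = "USOIL" := by
  simp [pvAliasLoop, pv_aliases_eq, PySem.Dict.get?, PySem.List.slice_to]

theorem pv_hit_WTI (t : List Char) (s : String) :
    (pvAliasLoop ("WTI".toList ++ t) [2,3,4,5,6,7]).getD s = "USOIL" := by
  simp [pvAliasLoop, pv_aliases_eq, PySem.Dict.get?, PySem.List.slice_to]

theorem pv_hit_CL (t : List Char) (s : String) :
    (pvAliasLoop ("CL".toList ++ t) [2,3,4,5,6,7]).getD s = "USOIL" := by
  simp [pvAliasLoop, pv_aliases_eq, PySem.Dict.get?, PySem.List.slice_to]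

theorem pv_hit_OIL (t : List Char) (s : String) :
    (pvAliasLoop ("OIL".toList ++ t) [2,3,4,5,6,7]).getD s = "USOIL" := by
  simp [pvAliasLoop, pv_aliases_eq, PySem.Dict.get?, PySem.List.slice_to]

theorem pv_hit_BTCUSD (t : List Char) (s : String) :
    (pvAliasLoop ("BTCUSD".toList ++ t) [2,3,4,5,6,7]).getD s = "BTCUSD" := by
  simp [pvAliasLoop, pv_aliases_eq, PySem.Dict.get?, PySem.List.slice_to]

theorem pv_hit_BTCUSDT (t : List Char) (s : String) :
    (pvAliasLoop ("BTCUSDT".toList ++ t) [2,3,4,5,6,7]).getD s = "BTCUSD" := by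
  simp [pvAliasLoop, pv_aliases_eq, PySem.Dict.get?, PySem.List.slice_to]

theorem pv_hit_XBTUSD (t : List Char) (s : String) :
    (pvAliasLoop ("XBTUSD".toList ++ t) [2,3,4,5,6,7]).getD s = "BTCUSD" := by
  simp [pvAliasLoop, pv_aliases_eq, PySem.Dict.get?, PySem.List.slice_to]

theorem pv_miss (l : List Char)
    (h0 : ¬ (['E', 'U', 'R', 'U', 'S', 'D'] : List Char) <+: l)
    (h1 : ¬ (['G', 'B', 'P', 'U', 'S', 'D'] : List Char) <+: l)
    (h2 : ¬ (['U', 'S', 'D', 'J', 'P', 'Y'] : List Char) <+: l)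
    (h3 : ¬ (['E', 'U', 'R', 'G', 'B', 'P'] : List Char) <+: l)
    (h4 : ¬ (['X', 'A', 'U', 'U', 'S', 'D'] : List Char) <+: l)
    (h5 : ¬ (['G', 'O', 'L', 'D'] : List Char) <+: l)
    (h6 : ¬ (['N', 'A', 'S', '1', '0', '0'] : List Char) <+: l)
    (h7 : ¬ (['U', 'S', '1', '0', '0'] : List Char) <+: l)
    (h8 : ¬ (['U', 'S', 'T', 'E', 'C'] : List Char) <+: l)
    (h9 : ¬ (['N', 'A', 'S', 'D', 'A', 'Q'] : List Char) <+: l)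
    (h10 : ¬ (['N', 'Q'] : List Char) <+: l)
    (h11 : ¬ (['U', 'S', 'O', 'I', 'L'] : List Char) <+: l)
    (h12 : ¬ (['U', 'S', 'O'] : List Char) <+: l)
    (h13 : ¬ (['W', 'T', 'I'] : List Char) <+: l)
    (h14 : ¬ (['C', 'L'] : List Char) <+: l)
    (h15 : ¬ (['O', 'I', 'L'] : List Char) <+: l)
    (h16 : ¬ (['B', 'T', 'C', 'U', 'S', 'D'] : List Char) <+: l)
    (h17 : ¬ (['B', 'T', 'C', 'U', 'S', 'D', 'T'] : List Char) <+: l)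
    (h18 : ¬ (['X', 'B', 'T', 'U', 'S', 'D'] : List Char) <+: l) :
    pvAliasLoop l [2,3,4,5,6,7] = none := by
  have g0_2 : ((['E', 'U', 'R', 'U', 'S', 'D'] : List Char) == l.take 2) = false := by
    apply beq_eq_false_iff_ne.mpr
    intro h
    have hlen := congrArg List.length h
    simp at hlen
    omega
  have g1_2 : ((['G', 'B', 'P', 'U', 'S', 'D'] : List Char) == l.take 2) = false := by
    apply beq_eq_false_iff_ne.mpr
    intro h
    have hlen := congrArg List.length h
    simp at hlen
    omega
  have g2_2 : ((['U', 'S', 'D', 'J', 'P', 'Y'] : List Char) == l.take 2) = false := by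
    apply beq_eq_false_iff_ne.mpr
    intro h
    have hlen := congrArg List.length h
    simp at hlen
    omega
  have g3_2 : ((['E', 'U', 'R', 'G', 'B', 'P'] : List Char) == l.take 2) = false := by
    apply beq_eq_false_iff_ne.mpr
    intro h
    have hlen := congrArg List.length h
    simp at hlen
    omega
  have g4_2 : ((['X', 'A', 'U', 'U', 'S', 'D'] : List Char) == l.take 2) = false := by
    apply beq_eq_false_iff_ne.mpr
    intro h
    have hlen := congrArg List.length h
    simp at hlen
    omega
  have g5_2 : ((['G', 'O', 'L', 'D'] : List Char) == l.take 2) = false := by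
    apply beq_eq_false_iff_ne.mpr
    intro h
    have hlen := congrArg List.length h
    simp at hlen
    omega
  have g6_2 : ((['N', 'A', 'S', '1', '0', '0'] : List Char) == l.take 2) = false := by
    apply beq_eq_false_iff_ne.mpr
    intro h
    have hlen := congrArg List.length h
    simp at hlen
    omega
  have g7_2 : ((['U', 'S', '1', '0', '0'] : List Char) == l.take 2) = false := by
    apply beq_eq_false_iff_ne.mpr
    intro h
    have hlen := congrArg List.length h
    simp at hlen
    omega
  have g8_2 : ((['U', 'S', 'T', 'E', 'C'] : List Char) == l.take 2) = false := by
    apply beq_eq_false_iff_ne.mpr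
    intro h
    have hlen := congrArg List.length h
    simp at hlen
    omega
  have g9_2 : ((['N', 'A', 'S', 'D', 'A', 'Q'] : List Char) == l.take 2) = false := by
    apply beq_eq_false_iff_ne.mpr
    intro h
    have hlen := congrArg List.length h
    simp at hlen
    omega
  have g10_2 : ((['N', 'Q'] : List Char) == l.take 2) = false := beq_eq_false_iff_ne.mpr (fun h => h10 (h ▸ List.take_prefix 2 l))
  have g11_2 : ((['U', 'S', 'O', 'I', 'L'] : List Char) == l.take 2) = false := by
    apply beq_eq_false_iff_ne.mpr
    intro h
    have hlen := congrArg List.length h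
    simp at hlen
    omega
  have g12_2 : ((['U', 'S', 'O'] : List Char) == l.take 2) = false := by
    apply beq_eq_false_iff_ne.mpr
    intro h
    have hlen := congrArg List.length h
    simp at hlen
    omega
  have g13_2 : ((['W', 'T', 'I'] : List Char) == l.take 2) = false := by
    apply beq_eq_false_iff_ne.mpr
    intro h
    have hlen := congrArg List.length h
    simp at hlen
    omega
  have g14_2 : ((['C', 'L'] : List Char) == l.take 2) = false := beq_eq_false_iff_ne.mpr (fun h => h14 (h ▸ List.take_prefix 2 l))
  have g15_2 : ((['O', 'I', 'L'] : List Char) == l.take 2) = false := by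
    apply beq_eq_false_iff_ne.mpr
    intro h
    have hlen := congrArg List.length h
    simp at hlen
    omega
  have g16_2 : ((['B', 'T', 'C', 'U', 'S', 'D'] : List Char) == l.take 2) = false := by
    apply beq_eq_false_iff_ne.mpr
    intro h
    have hlen := congrArg List.length h
    simp at hlen
    omega
  have g17_2 : ((['B', 'T', 'C', 'U', 'S', 'D', 'T'] : List Char) == l.take 2) = false := by
    apply beq_eq_false_iff_ne.mpr
    intro h
    have hlen := congrArg List.length h
    simp at hlen
    omega
  have g18_2 : ((['X', 'B', 'T', 'U', 'S', 'D'] : List Char) == l.take 2) = false := by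
    apply beq_eq_false_iff_ne.mpr
    intro h
    have hlen := congrArg List.length h
    simp at hlen
    omega
  have g0_3 : ((['E', 'U', 'R', 'U', 'S', 'D'] : List Char) == l.take 3) = false := by
    apply beq_eq_false_iff_ne.mpr
    intro h
    have hlen := congrArg List.length h
    simp at hlen
    omega
  have g1_3 : ((['G', 'B', 'P', 'U', 'S', 'D'] : List Char) == l.take 3) = false := by
    apply beq_eq_false_iff_ne.mpr
    intro h
    have hlen := congrArg List.length h
    simp at hlen
    omega
  have g2_3 : ((['U', 'S', 'D', 'J', 'P', 'Y'] : List Char) == l.take 3) = false := by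
    apply beq_eq_false_iff_ne.mpr
    intro h
    have hlen := congrArg List.length h
    simp at hlen
    omega
  have g3_3 : ((['E', 'U', 'R', 'G', 'B', 'P'] : List Char) == l.take 3) = false := by
    apply beq_eq_false_iff_ne.mpr
    intro h
    have hlen := congrArg List.length h
    simp at hlen
    omega
  have g4_3 : ((['X', 'A', 'U', 'U', 'S', 'D'] : List Char) == l.take 3) = false := by
    apply beq_eq_false_iff_ne.mpr
    intro h
    have hlen := congrArg List.length h
    simp at hlen
    omega
  have g5_3 : ((['G', 'O', 'L', 'D'] : List Char) == l.take 3) = false := by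
    apply beq_eq_false_iff_ne.mpr
    intro h
    have hlen := congrArg List.length h
    simp at hlen
    omega
  have g6_3 : ((['N', 'A', 'S', '1', '0', '0'] : List Char) == l.take 3) = false := by
    apply beq_eq_false_iff_ne.mpr
    intro h
    have hlen := congrArg List.length h
    simp at hlen
    omega
  have g7_3 : ((['U', 'S', '1', '0', '0'] : List Char) == l.take 3) = false := by
    apply beq_eq_false_iff_ne.mpr
    intro h
    have hlen := congrArg List.length h
    simp at hlen
    omega
  have g8_3 : ((['U', 'S', 'T', 'E', 'C'] : List Char) == l.take 3) = false := by
    apply beq_eq_false_iff_ne.mpr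
    intro h
    have hlen := congrArg List.length h
    simp at hlen
    omega
  have g9_3 : ((['N', 'A', 'S', 'D', 'A', 'Q'] : List Char) == l.take 3) = false := by
    apply beq_eq_false_iff_ne.mpr
    intro h
    have hlen := congrArg List.length h
    simp at hlen
    omega
  have g10_3 : ((['N', 'Q'] : List Char) == l.take 3) = false := beq_eq_false_iff_ne.mpr (fun h => h10 (h ▸ List.take_prefix 3 l))
  have g11_3 : ((['U', 'S', 'O', 'I', 'L'] : List Char) == l.take 3) = false := by
    apply beq_eq_false_iff_ne.mpr
    intro h
    have hlen := congrArg List.length h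
    simp at hlen
    omega
  have g12_3 : ((['U', 'S', 'O'] : List Char) == l.take 3) = false := beq_eq_false_iff_ne.mpr (fun h => h12 (h ▸ List.take_prefix 3 l))
  have g13_3 : ((['W', 'T', 'I'] : List Char) == l.take 3) = false := beq_eq_false_iff_ne.mpr (fun h => h13 (h ▸ List.take_prefix 3 l))
  have g14_3 : ((['C', 'L'] : List Char) == l.take 3) = false := beq_eq_false_iff_ne.mpr (fun h => h14 (h ▸ List.take_prefix 3 l))
  have g15_3 : ((['O', 'I', 'L'] : List Char) == l.take 3) = false := beq_eq_false_iff_ne.mpr (fun h => h15 (h ▸ List.take_prefix 3 l))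
  have g16_3 : ((['B', 'T', 'C', 'U', 'S', 'D'] : List Char) == l.take 3) = false := by
    apply beq_eq_false_iff_ne.mpr
    intro h
    have hlen := congrArg List.length h
    simp at hlen
    omega
  have g17_3 : ((['B', 'T', 'C', 'U', 'S', 'D', 'T'] : List Char) == l.take 3) = false := by
    apply beq_eq_false_iff_ne.mpr
    intro h
    have hlen := congrArg List.length h
    simp at hlen
    omega
  have g18_3 : ((['X', 'B', 'T', 'U', 'S', 'D'] : List Char) == l.take 3) = false := by
    apply beq_eq_false_iff_ne.mpr
    intro h
    have hlen := congrArg List.length h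
    simp at hlen
    omega
  have g0_4 : ((['E', 'U', 'R', 'U', 'S', 'D'] : List Char) == l.take 4) = false := by
    apply beq_eq_false_iff_ne.mpr
    intro h
    have hlen := congrArg List.length h
    simp at hlen
    omega
  have g1_4 : ((['G', 'B', 'P', 'U', 'S', 'D'] : List Char) == l.take 4) = false := by
    apply beq_eq_false_iff_ne.mpr
    intro h
    have hlen := congrArg List.length h
    simp at hlen
    omega
  have g2_4 : ((['U', 'S', 'D', 'J', 'P', 'Y'] : List Char) == l.take 4) = false := by
    apply beq_eq_false_iff_ne.mpr
    intro h
    have hlen := congrArg List.length h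
    simp at hlen
    omega
  have g3_4 : ((['E', 'U', 'R', 'G', 'B', 'P'] : List Char) == l.take 4) = false := by
    apply beq_eq_false_iff_ne.mpr
    intro h
    have hlen := congrArg List.length h
    simp at hlen
    omega
  have g4_4 : ((['X', 'A', 'U', 'U', 'S', 'D'] : List Char) == l.take 4) = false := by
    apply beq_eq_false_iff_ne.mpr
    intro h
    have hlen := congrArg List.length h
    simp at hlen
    omega
  have g5_4 : ((['G', 'O', 'L', 'D'] : List Char) == l.take 4) = false := beq_eq_false_iff_ne.mpr (fun h => h5 (h ▸ List.take_prefix 4 l))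
  have g6_4 : ((['N', 'A', 'S', '1', '0', '0'] : List Char) == l.take 4) = false := by
    apply beq_eq_false_iff_ne.mpr
    intro h
    have hlen := congrArg List.length h
    simp at hlen
    omega
  have g7_4 : ((['U', 'S', '1', '0', '0'] : List Char) == l.take 4) = false := by
    apply beq_eq_false_iff_ne.mpr
    intro h
    have hlen := congrArg List.length h
    simp at hlen
    omega
  have g8_4 : ((['U', 'S', 'T', 'E', 'C'] : List Char) == l.take 4) = false := by
    apply beq_eq_false_iff_ne.mpr
    intro h
    have hlen := congrArg List.length h
    simp at hlen
    omega
  have g9_4 : ((['N', 'A', 'S', 'D', 'A', 'Q'] : List Char) == l.take 4) = false := by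
    apply beq_eq_false_iff_ne.mpr
    intro h
    have hlen := congrArg List.length h
    simp at hlen
    omega
  have g10_4 : ((['N', 'Q'] : List Char) == l.take 4) = false := beq_eq_false_iff_ne.mpr (fun h => h10 (h ▸ List.take_prefix 4 l))
  have g11_4 : ((['U', 'S', 'O', 'I', 'L'] : List Char) == l.take 4) = false := by
    apply beq_eq_false_iff_ne.mpr
    intro h
    have hlen := congrArg List.length h
    simp at hlen
    omega
  have g12_4 : ((['U', 'S', 'O'] : List Char) == l.take 4) = false := beq_eq_false_iff_ne.mpr (fun h => h12 (h ▸ List.take_prefix 4 l))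
  have g13_4 : ((['W', 'T', 'I'] : List Char) == l.take 4) = false := beq_eq_false_iff_ne.mpr (fun h => h13 (h ▸ List.take_prefix 4 l))
  have g14_4 : ((['C', 'L'] : List Char) == l.take 4) = false := beq_eq_false_iff_ne.mpr (fun h => h14 (h ▸ List.take_prefix 4 l))
  have g15_4 : ((['O', 'I', 'L'] : List Char) == l.take 4) = false := beq_eq_false_iff_ne.mpr (fun h => h15 (h ▸ List.take_prefix 4 l))
  have g16_4 : ((['B', 'T', 'C', 'U', 'S', 'D'] : List Char) == l.take 4) = false := by
    apply beq_eq_false_iff_ne.mpr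
    intro h
    have hlen := congrArg List.length h
    simp at hlen
    omega
  have g17_4 : ((['B', 'T', 'C', 'U', 'S', 'D', 'T'] : List Char) == l.take 4) = false := by
    apply beq_eq_false_iff_ne.mpr
    intro h
    have hlen := congrArg List.length h
    simp at hlen
    omega
  have g18_4 : ((['X', 'B', 'T', 'U', 'S', 'D'] : List Char) == l.take 4) = false := by
    apply beq_eq_false_iff_ne.mpr
    intro h
    have hlen := congrArg List.length h
    simp at hlen
    omega
  have g0_5 : ((['E', 'U', 'R', 'U', 'S', 'D'] : List Char) == l.take 5) = false := by
    apply beq_eq_false_iff_ne.mpr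
    intro h
    have hlen := congrArg List.length h
    simp at hlen
    omega
  have g1_5 : ((['G', 'B', 'P', 'U', 'S', 'D'] : List Char) == l.take 5) = false := by
    apply beq_eq_false_iff_ne.mpr
    intro h
    have hlen := congrArg List.length h
    simp at hlen
    omega
  have g2_5 : ((['U', 'S', 'D', 'J', 'P', 'Y'] : List Char) == l.take 5) = false := by
    apply beq_eq_false_iff_ne.mpr
    intro h
    have hlen := congrArg List.length h
    simp at hlen
    omega
  have g3_5 : ((['E', 'U', 'R', 'G', 'B', 'P'] : List Char) == l.take 5) = false := by
    apply beq_eq_false_iff_ne.mpr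
    intro h
    have hlen := congrArg List.length h
    simp at hlen
    omega
  have g4_5 : ((['X', 'A', 'U', 'U', 'S', 'D'] : List Char) == l.take 5) = false := by
    apply beq_eq_false_iff_ne.mpr
    intro h
    have hlen := congrArg List.length h
    simp at hlen
    omega
  have g5_5 : ((['G', 'O', 'L', 'D'] : List Char) == l.take 5) = false := beq_eq_false_iff_ne.mpr (fun h => h5 (h ▸ List.take_prefix 5 l))
  have g6_5 : ((['N', 'A', 'S', '1', '0', '0'] : List Char) == l.take 5) = false := by
    apply beq_eq_false_iff_ne.mpr
    intro h
    have hlen := congrArg List.length h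
    simp at hlen
    omega
  have g7_5 : ((['U', 'S', '1', '0', '0'] : List Char) == l.take 5) = false := beq_eq_false_iff_ne.mpr (fun h => h7 (h ▸ List.take_prefix 5 l))
  have g8_5 : ((['U', 'S', 'T', 'E', 'C'] : List Char) == l.take 5) = false := beq_eq_false_iff_ne.mpr (fun h => h8 (h ▸ List.take_prefix 5 l))
  have g9_5 : ((['N', 'A', 'S', 'D', 'A', 'Q'] : List Char) == l.take 5) = false := by
    apply beq_eq_false_iff_ne.mpr
    intro h
    have hlen := congrArg List.length h
    simp at hlen
    omega
  have g10_5 : ((['N', 'Q'] : List Char) == l.take 5) = false := beq_eq_false_iff_ne.mpr (fun h => h10 (h ▸ List.take_prefix 5 l))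
  have g11_5 : ((['U', 'S', 'O', 'I', 'L'] : List Char) == l.take 5) = false := beq_eq_false_iff_ne.mpr (fun h => h11 (h ▸ List.take_prefix 5 l))
  have g12_5 : ((['U', 'S', 'O'] : List Char) == l.take 5) = false := beq_eq_false_iff_ne.mpr (fun h => h12 (h ▸ List.take_prefix 5 l))
  have g13_5 : ((['W', 'T', 'I'] : List Char) == l.take 5) = false := beq_eq_false_iff_ne.mpr (fun h => h13 (h ▸ List.take_prefix 5 l))
  have g14_5 : ((['C', 'L'] : List Char) == l.take 5) = false := beq_eq_false_iff_ne.mpr (fun h => h14 (h ▸ List.take_prefix 5 l))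
  have g15_5 : ((['O', 'I', 'L'] : List Char) == l.take 5) = false := beq_eq_false_iff_ne.mpr (fun h => h15 (h ▸ List.take_prefix 5 l))
  have g16_5 : ((['B', 'T', 'C', 'U', 'S', 'D'] : List Char) == l.take 5) = false := by
    apply beq_eq_false_iff_ne.mpr
    intro h
    have hlen := congrArg List.length h
    simp at hlen
    omega
  have g17_5 : ((['B', 'T', 'C', 'U', 'S', 'D', 'T'] : List Char) == l.take 5) = false := by
    apply beq_eq_false_iff_ne.mpr
    intro h
    have hlen := congrArg List.length h
    simp at hlen
    omega
  have g18_5 : ((['X', 'B', 'T', 'U', 'S', 'D'] : List Char) == l.take 5) = false := by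
    apply beq_eq_false_iff_ne.mpr
    intro h
    have hlen := congrArg List.length h
    simp at hlen
    omega
  have g0_6 : ((['E', 'U', 'R', 'U', 'S', 'D'] : List Char) == l.take 6) = false := beq_eq_false_iff_ne.mpr (fun h => h0 (h ▸ List.take_prefix 6 l))
  have g1_6 : ((['G', 'B', 'P', 'U', 'S', 'D'] : List Char) == l.take 6) = false := beq_eq_false_iff_ne.mpr (fun h => h1 (h ▸ List.take_prefix 6 l))
  have g2_6 : ((['U', 'S', 'D', 'J', 'P', 'Y'] : List Char) == l.take 6) = false := beq_eq_false_iff_ne.mpr (fun h => h2 (h ▸ List.take_prefix 6 l))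
  have g3_6 : ((['E', 'U', 'R', 'G', 'B', 'P'] : List Char) == l.take 6) = false := beq_eq_false_iff_ne.mpr (fun h => h3 (h ▸ List.take_prefix 6 l))
  have g4_6 : ((['X', 'A', 'U', 'U', 'S', 'D'] : List Char) == l.take 6) = false := beq_eq_false_iff_ne.mpr (fun h => h4 (h ▸ List.take_prefix 6 l))
  have g5_6 : ((['G', 'O', 'L', 'D'] : List Char) == l.take 6) = false := beq_eq_false_iff_ne.mpr (fun h => h5 (h ▸ List.take_prefix 6 l))
  have g6_6 : ((['N', 'A', 'S', '1', '0', '0'] : List Char) == l.take 6) = false := beq_eq_false_iff_ne.mpr (fun h => h6 (h ▸ List.take_prefix 6 l))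
  have g7_6 : ((['U', 'S', '1', '0', '0'] : List Char) == l.take 6) = false := beq_eq_false_iff_ne.mpr (fun h => h7 (h ▸ List.take_prefix 6 l))
  have g8_6 : ((['U', 'S', 'T', 'E', 'C'] : List Char) == l.take 6) = false := beq_eq_false_iff_ne.mpr (fun h => h8 (h ▸ List.take_prefix 6 l))
  have g9_6 : ((['N', 'A', 'S', 'D', 'A', 'Q'] : List Char) == l.take 6) = false := beq_eq_false_iff_ne.mpr (fun h => h9 (h ▸ List.take_prefix 6 l))
  have g10_6 : ((['N', 'Q'] : List Char) == l.take 6) = false := beq_eq_false_iff_ne.mpr (fun h => h10 (h ▸ List.take_prefix 6 l))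
  have g11_6 : ((['U', 'S', 'O', 'I', 'L'] : List Char) == l.take 6) = false := beq_eq_false_iff_ne.mpr (fun h => h11 (h ▸ List.take_prefix 6 l))
  have g12_6 : ((['U', 'S', 'O'] : List Char) == l.take 6) = false := beq_eq_false_iff_ne.mpr (fun h => h12 (h ▸ List.take_prefix 6 l))
  have g13_6 : ((['W', 'T', 'I'] : List Char) == l.take 6) = false := beq_eq_false_iff_ne.mpr (fun h => h13 (h ▸ List.take_prefix 6 l))
  have g14_6 : ((['C', 'L'] : List Char) == l.take 6) = false := beq_eq_false_iff_ne.mpr (fun h => h14 (h ▸ List.take_prefix 6 l))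
  have g15_6 : ((['O', 'I', 'L'] : List Char) == l.take 6) = false := beq_eq_false_iff_ne.mpr (fun h => h15 (h ▸ List.take_prefix 6 l))
  have g16_6 : ((['B', 'T', 'C', 'U', 'S', 'D'] : List Char) == l.take 6) = false := beq_eq_false_iff_ne.mpr (fun h => h16 (h ▸ List.take_prefix 6 l))
  have g17_6 : ((['B', 'T', 'C', 'U', 'S', 'D', 'T'] : List Char) == l.take 6) = false := by
    apply beq_eq_false_iff_ne.mpr
    intro h
    have hlen := congrArg List.length h
    simp at hlen
    omega
  have g18_6 : ((['X', 'B', 'T', 'U', 'S', 'D'] : List Char) == l.take 6) = false := beq_eq_false_iff_ne.mpr (fun h => h18 (h ▸ List.take_prefix 6 l))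
  have g0_7 : ((['E', 'U', 'R', 'U', 'S', 'D'] : List Char) == l.take 7) = false := beq_eq_false_iff_ne.mpr (fun h => h0 (h ▸ List.take_prefix 7 l))
  have g1_7 : ((['G', 'B', 'P', 'U', 'S', 'D'] : List Char) == l.take 7) = false := beq_eq_false_iff_ne.mpr (fun h => h1 (h ▸ List.take_prefix 7 l))
  have g2_7 : ((['U', 'S', 'D', 'J', 'P', 'Y'] : List Char) == l.take 7) = false := beq_eq_false_iff_ne.mpr (fun h => h2 (h ▸ List.take_prefix 7 l))
  have g3_7 : ((['E', 'U', 'R', 'G', 'B', 'P'] : List Char) == l.take 7) = false := beq_eq_false_iff_ne.mpr (fun h => h3 (h ▸ List.take_prefix 7 l))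
  have g4_7 : ((['X', 'A', 'U', 'U', 'S', 'D'] : List Char) == l.take 7) = false := beq_eq_false_iff_ne.mpr (fun h => h4 (h ▸ List.take_prefix 7 l))
  have g5_7 : ((['G', 'O', 'L', 'D'] : List Char) == l.take 7) = false := beq_eq_false_iff_ne.mpr (fun h => h5 (h ▸ List.take_prefix 7 l))
  have g6_7 : ((['N', 'A', 'S', '1', '0', '0'] : List Char) == l.take 7) = false := beq_eq_false_iff_ne.mpr (fun h => h6 (h ▸ List.take_prefix 7 l))
  have g7_7 : ((['U', 'S', '1', '0', '0'] : List Char) == l.take 7) = false := beq_eq_false_iff_ne.mpr (fun h => h7 (h ▸ List.take_prefix 7 l))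
  have g8_7 : ((['U', 'S', 'T', 'E', 'C'] : List Char) == l.take 7) = false := beq_eq_false_iff_ne.mpr (fun h => h8 (h ▸ List.take_prefix 7 l))
  have g9_7 : ((['N', 'A', 'S', 'D', 'A', 'Q'] : List Char) == l.take 7) = false := beq_eq_false_iff_ne.mpr (fun h => h9 (h ▸ List.take_prefix 7 l))
  have g10_7 : ((['N', 'Q'] : List Char) == l.take 7) = false := beq_eq_false_iff_ne.mpr (fun h => h10 (h ▸ List.take_prefix 7 l))
  have g11_7 : ((['U', 'S', 'O', 'I', 'L'] : List Char) == l.take 7) = false := beq_eq_false_iff_ne.mpr (fun h => h11 (h ▸ List.take_prefix 7 l))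
  have g12_7 : ((['U', 'S', 'O'] : List Char) == l.take 7) = false := beq_eq_false_iff_ne.mpr (fun h => h12 (h ▸ List.take_prefix 7 l))
  have g13_7 : ((['W', 'T', 'I'] : List Char) == l.take 7) = false := beq_eq_false_iff_ne.mpr (fun h => h13 (h ▸ List.take_prefix 7 l))
  have g14_7 : ((['C', 'L'] : List Char) == l.take 7) = false := beq_eq_false_iff_ne.mpr (fun h => h14 (h ▸ List.take_prefix 7 l))
  have g15_7 : ((['O', 'I', 'L'] : List Char) == l.take 7) = false := beq_eq_false_iff_ne.mpr (fun h => h15 (h ▸ List.take_prefix 7 l))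
  have g16_7 : ((['B', 'T', 'C', 'U', 'S', 'D'] : List Char) == l.take 7) = false := beq_eq_false_iff_ne.mpr (fun h => h16 (h ▸ List.take_prefix 7 l))
  have g17_7 : ((['B', 'T', 'C', 'U', 'S', 'D', 'T'] : List Char) == l.take 7) = false := beq_eq_false_iff_ne.mpr (fun h => h17 (h ▸ List.take_prefix 7 l))
  have g18_7 : ((['X', 'B', 'T', 'U', 'S', 'D'] : List Char) == l.take 7) = false := beq_eq_false_iff_ne.mpr (fun h => h18 (h ▸ List.take_prefix 7 l))
  simp [pvAliasLoop, pv_aliases_eq, PySem.Dict.get?, PySem.List.slice_to, List.find?_cons_of_neg, List.find?_nil,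
    g0_2, g1_2, g2_2, g3_2, g4_2, g5_2, g6_2, g7_2, g8_2, g9_2, g10_2, g11_2, g12_2, g13_2, g14_2, g15_2, g16_2, g17_2, g18_2, g0_3, g1_3, g2_3, g3_3, g4_3, g5_3, g6_3, g7_3, g8_3, g9_3, g10_3, g11_3, g12_3, g13_3, g14_3, g15_3, g16_3, g17_3, g18_3, g0_4, g1_4, g2_4, g3_4, g4_4, g5_4, g6_4, g7_4, g8_4, g9_4, g10_4, g11_4, g12_4, g13_4, g14_4, g15_4, g16_4, g17_4, g18_4, g0_5, g1_5, g2_5, g3_5, g4_5, g5_5, g6_5, g7_5, g8_5, g9_5, g10_5, g11_5, g12_5, g13_5, g14_5, g15_5, g16_5, g17_5, g18_5, g0_6, g1_6, g2_6, g3_6, g4_6, g5_6, g6_6, g7_6, g8_6, g9_6, g10_6, g11_6, g12_6, g13_6, g14_6, g15_6, g16_6, g17_6, g18_6, g0_7, g1_7, g2_7, g3_7, g4_7, g5_7, g6_7, g7_7, g8_7, g9_7, g10_7, g11_7, g12_7, g13_7, g14_7, g15_7, g16_7, g17_7, g18_7]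

set_option maxHeartbeats 1000000 in
theorem pv_core (l : List Char) :
    (if PySem.Str.startswith (String.ofList l) "EURUSD" then "EURUSD"
     else if PySem.Str.startswith (String.ofList l) "GBPUSD" then "GBPUSD"
     else if PySem.Str.startswith (String.ofList l) "USDJPY" then "USDJPY"
     else if PySem.Str.startswith (String.ofList l) "EURGBP" then "EURGBP"
     else if PySem.Str.startswith (String.ofList l) "XAUUSD" || PySem.Str.startswith (String.ofList l) "GOLD" then "XAUUSD"
     else if PySem.Str.startswith (String.ofList l) "NAS100" || (PySem.Str.startswith (String.ofList l) "US100" ||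
             (PySem.Str.startswith (String.ofList l) "USTEC" || (PySem.Str.startswith (String.ofList l) "NASDAQ" ||
             PySem.Str.startswith (String.ofList l) "NQ"))) then "NAS100"
     else if PySem.Str.startswith (String.ofList l) "USOIL" || (PySem.Str.startswith (String.ofList l) "USO" ||
             (PySem.Str.startswith (String.ofList l) "WTI" || (PySem.Str.startswith (String.ofList l) "CL" ||
             PySem.Str.startswith (String.ofList l) "OIL"))) then "USOIL"
     else if PySem.Str.startswith (String.ofList l) "BTCUSD" || (PySem.Str.startswith (String.ofList l) "BTCUSDT" ||
             PySem.Str.startswith (String.ofList l) "XBTUSD") then "BTCUSD"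
     else String.ofList l)
    = (pvAliasLoop l (PySem.List.pyRange 2 8 1)).getD (String.ofList l) := by
  rw [pv_range_eq]
  simp only [PySem.Str.startswith_eq, String.toList_ofList, PySem.Chars.startswith_iff,
    Bool.or_eq_true]
  split_ifs with hA1 hA2 hA3 hA4 hA5 hA6 hA7 hA8
  · obtain ⟨t, rfl⟩ := hA1
    exact (pv_hit_EURUSD t _).symm
  · obtain ⟨t, rfl⟩ := hA2
    exact (pv_hit_GBPUSD t _).symm
  · obtain ⟨t, rfl⟩ := hA3
    exact (pv_hit_USDJPY t _).symm
  · obtain ⟨t, rfl⟩ := hA4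
    exact (pv_hit_EURGBP t _).symm
  · rcases hA5 with h|h
    · obtain ⟨t, rfl⟩ := h
      exact (pv_hit_XAUUSD t _).symm
    · obtain ⟨t, rfl⟩ := h
      exact (pv_hit_GOLD t _).symm
  · rcases hA6 with h|h|h|h|h
    · obtain ⟨t, rfl⟩ := h
      exact (pv_hit_NAS100 t _).symm
    · obtain ⟨t, rfl⟩ := h
      exact (pv_hit_US100 t _).symm
    · obtain ⟨t, rfl⟩ := h
      exact (pv_hit_USTEC t _).symm
    · obtain ⟨t, rfl⟩ := h
      exact (pv_hit_NASDAQ t _).symm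
    · obtain ⟨t, rfl⟩ := h
      exact (pv_hit_NQ t _).symm
  · rcases hA7 with h|h|h|h|h
    · obtain ⟨t, rfl⟩ := h
      exact (pv_hit_USOIL t _).symm
    · obtain ⟨t, rfl⟩ := h
      exact (pv_hit_USO t _).symm
    · obtain ⟨t, rfl⟩ := h
      exact (pv_hit_WTI t _).symm
    · obtain ⟨t, rfl⟩ := h
      exact (pv_hit_CL t _).symm
    · obtain ⟨t, rfl⟩ := h
      exact (pv_hit_OIL t _).symm
  · rcases hA8 with h|h|h
    · obtain ⟨t, rfl⟩ := h
      exact (pv_hit_BTCUSD t _).symm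
    · obtain ⟨t, rfl⟩ := h
      exact (pv_hit_BTCUSDT t _).symm
    · obtain ⟨t, rfl⟩ := h
      exact (pv_hit_XBTUSD t _).symm
  · simp only [not_or] at hA5 hA6 hA7 hA8
    obtain ⟨n5a, n5b⟩ := hA5
    obtain ⟨n6a, n6b, n6c, n6d, n6e⟩ := hA6
    obtain ⟨n7a, n7b, n7c, n7d, n7e⟩ := hA7
    obtain ⟨n8a, n8b, n8c⟩ := hA8
    rw [pv_miss l hA1 hA2 hA3 hA4 n5a n5b n6a n6b n6c n6d n6e n7a n7b n7c n7d n7e n8a n8b n8c]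
    rfl

-- ===== VERDICT (by name: the statement is the Claim_ definition above) =====
theorem normalize_cluster_symbol_py_spec : Claim_equal_normalize_cluster_symbol_py := by
  intro symbol _
  unfold Spec_normalize_cluster_symbol_py normalize_cluster_symbol_py normalize_cluster_symbol_py_alt
  exact pv_core _
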